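-- pv_equiv track=rewrite | github.com/Fruitfull-Research/algo-scuptor | streamlit_app.py | extruder
-- ===== SOURCE A (Python) =====
-- def extruder(xy_img, minx, maxy, fix = 'x'):
-- 	moves = ['x', 'y', 'z']
-- 	moves.remove(fix)
--
-- 	xyz_img = {'x' : [], 'y' : [], 'z' : []}
--
-- 	for i in range(len(xy_img['x'])):
-- 		# with 2D_xy if 3D_y is fixed then 3D_x = 2D_x and 3D_z = 2D_y
-- 		vals = [xy_img['x'][i], xy_img['y'][i]] #TODO: check if it's right doing this
-- 		for k in range(minx, maxy):
-- 			xyz_img[fix].append(k)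
-- 			for j, e in enumerate(moves):
-- 				xyz_img[e].append(vals[j])
--
-- 	return xyz_img
-- ===== SOURCE B (Python) =====
-- def extruder(xy_img, minx, maxy, fix = 'x'):
--     # Build the three output columns independently by block repetition,
--     # instead of A's interleaved nested append loops.
--     moves = ['x', 'y', 'z']
--     moves.remove(fix)
--     n = len(xy_img['x'])
--     ks = list(range(minx, maxy))
--     xyz_img = {'x': [], 'y': [], 'z': []}
--     xyz_img[fix] = ks * n
--     xyz_img[moves[0]] = [xy_img['x'][i] for i in range(n) for _ in ks]
--     xyz_img[moves[1]] = [xy_img['y'][i] for i in range(n) for _ in ks]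
--     return xyz_img
-- ===== Notes on version B (the rewrite author's own statement) =====
-- stated objective: simpler
-- what changed: B replaces A's interleaved triple-nested per-point append loop by building each of the three output columns independently with block repetition (range-list times n for the fixed axis, each 2D value repeated len(range) times for the moving axes).
import Mathlib
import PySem

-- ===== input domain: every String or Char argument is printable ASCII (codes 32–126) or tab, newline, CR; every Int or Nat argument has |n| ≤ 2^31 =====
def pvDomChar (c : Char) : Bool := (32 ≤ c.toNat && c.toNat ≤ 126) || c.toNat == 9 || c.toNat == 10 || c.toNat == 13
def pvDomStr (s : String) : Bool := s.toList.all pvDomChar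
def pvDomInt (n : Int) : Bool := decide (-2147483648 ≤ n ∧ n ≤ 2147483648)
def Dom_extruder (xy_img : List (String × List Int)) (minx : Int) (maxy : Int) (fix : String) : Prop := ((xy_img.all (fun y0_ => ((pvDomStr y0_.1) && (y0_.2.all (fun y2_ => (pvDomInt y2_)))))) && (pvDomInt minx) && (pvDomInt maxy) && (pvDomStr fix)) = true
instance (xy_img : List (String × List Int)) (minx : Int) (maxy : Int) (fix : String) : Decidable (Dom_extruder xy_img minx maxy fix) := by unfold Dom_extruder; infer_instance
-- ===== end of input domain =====

-- B builds the three output columns independently by block repetition (ks * n and value-repetition),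
-- replacing A's interleaved triple-nested append loop; objective: simpler decomposition, no speed claim.

-- ===== PORT A =====
-- the inner 'for k in range(minx, maxy)' loop of A, over the precomputed range list ks
def aInner (fix : String) (moves : List String) (vals : List Int) (ks : List Int)
    (d : PySem.Dict String (List Int)) : PySem.Dict String (List Int) :=
  ks.foldl (fun d k =>
    let d := PySem.Dict.modify d fix [] (fun l => l ++ [k])
    (PySem.List.enumerate moves).foldl (fun d je =>
      PySem.Dict.modify d je.2 [] (fun l => l ++ [PySem.List.pyGetD vals je.1 0])) d) d

def extruder (xy_img : List (String × List Int)) (minx : Int) (maxy : Int) (fix : String) : List (String × List Int) :=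
  let moves := (PySem.List.remove? ["x", "y", "z"] fix).getD []
  let xyz : PySem.Dict String (List Int) := PySem.Dict.mk [("x", []), ("y", []), ("z", [])]
  let img : PySem.Dict String (List Int) := PySem.Dict.mk xy_img
  let xs := PySem.Dict.getD img "x" []
  ((List.range xs.length).foldl (fun d (i : Nat) =>
      let vals := [PySem.List.pyGetD xs (i : Int) 0,
                   PySem.List.pyGetD (PySem.Dict.getD img "y" []) (i : Int) 0]
      aInner fix moves vals (PySem.List.pyRange minx maxy 1) d) xyz).items

-- ===== PORT B =====
def extruder_alt (xy_img : List (String × List Int)) (minx : Int) (maxy : Int) (fix : String) : List (String × List Int) :=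
  let moves := (PySem.List.remove? ["x", "y", "z"] fix).getD []
  let img : PySem.Dict String (List Int) := PySem.Dict.mk xy_img
  let xs := PySem.Dict.getD img "x" []
  let n := xs.length
  let ks := PySem.List.pyRange minx maxy 1
  let d0 : PySem.Dict String (List Int) := PySem.Dict.mk [("x", []), ("y", []), ("z", [])]
  let d1 := PySem.Dict.insert d0 fix ((List.replicate n ks).flatten)
  let d2 := PySem.Dict.insert d1 (PySem.List.pyGetD moves 0 "")
      ((List.range n).flatMap (fun (i : Nat) => List.replicate ks.length (PySem.List.pyGetD xs (i : Int) 0)))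
  let d3 := PySem.Dict.insert d2 (PySem.List.pyGetD moves 1 "")
      ((List.range n).flatMap (fun (i : Nat) => List.replicate ks.length (PySem.List.pyGetD (PySem.Dict.getD img "y" []) (i : Int) 0)))
  d3.items

-- ===== PRECONDITION & SPEC =====
-- Pre_ excludes exactly the inputs on which the Python A raises: fix outside {'x','y','z'} (ValueError),
-- missing key 'x' (KeyError), and — when 'x' is non-empty — a missing or shorter 'y' column (KeyError/IndexError).
def Pre_extruder (xy_img : List (String × List Int)) (minx : Int) (maxy : Int) (fix : String) : Prop :=
  (fix = "x" ∨ fix = "y" ∨ fix = "z") ∧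
  PySem.Dict.contains (PySem.Dict.mk xy_img) "x" = true ∧
  (PySem.Dict.getD (PySem.Dict.mk xy_img) "x" [] ≠ [] →
    PySem.Dict.contains (PySem.Dict.mk xy_img) "y" = true ∧
    (PySem.Dict.getD (PySem.Dict.mk xy_img) "x" []).length ≤ (PySem.Dict.getD (PySem.Dict.mk xy_img) "y" []).length)
instance (xy_img : List (String × List Int)) (minx : Int) (maxy : Int) (fix : String) : Decidable (Pre_extruder xy_img minx maxy fix) := by unfold Pre_extruder; infer_instance

def pvWitness_extruder : (List (String × List Int)) × Int × Int × String := ([("x", [1, 2]), ("y", [5, 6])], 0, 2, "z")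

def Spec_extruder (xy_img : List (String × List Int)) (minx : Int) (maxy : Int) (fix : String) (out : List (String × List Int)) : Prop := out = extruder_alt xy_img minx maxy fix
instance (xy_img : List (String × List Int)) (minx : Int) (maxy : Int) (fix : String) (out : List (String × List Int)) : Decidable (Spec_extruder xy_img minx maxy fix out) := by unfold Spec_extruder; infer_instance

-- ===== CLAIM (what is proved, stated in full; the proofs are below) =====
def Claim_equal_extruder : Prop := ∀ (xy_img : List (String × List Int)) (minx : Int) (maxy : Int) (fix : String), Dom_extruder xy_img minx maxy fix → Pre_extruder xy_img minx maxy fix → Spec_extruder xy_img minx maxy fix (extruder xy_img minx maxy fix)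
-- ===== LEMMAS AND PROOFS =====

lemma inner_x (ks : List Int) (u v : Int) (a b c : List Int) :
    aInner "x" ["y", "z"] [u, v] ks (PySem.Dict.mk [("x", a), ("y", b), ("z", c)])
    = PySem.Dict.mk [("x", a ++ ks), ("y", b ++ List.replicate ks.length u), ("z", c ++ List.replicate ks.length v)] := by
  induction ks generalizing a b c with
  | nil => simp [aInner]
  | cons k ks ih =>
    simp only [aInner, List.foldl_cons] at ih ⊢
    rw [show (let d := PySem.Dict.modify (PySem.Dict.mk [("x", a), ("y", b), ("z", c)]) "x" [] (fun l => l ++ [k])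
      (PySem.List.enumerate ["y", "z"]).foldl (fun d je =>
        PySem.Dict.modify d je.2 [] (fun l => l ++ [PySem.List.pyGetD [u, v] je.1 0])) d)
      = PySem.Dict.mk [("x", a ++ [k]), ("y", b ++ [u]), ("z", c ++ [v])] from by
        simp [PySem.Dict.modify, PySem.Dict.insert, PySem.Dict.getD, PySem.Dict.get?, PySem.List.enumerate, PySem.List.pyGetD]]
    rw [ih]
    simp [List.replicate_succ]

lemma inner_y (ks : List Int) (u v : Int) (a b c : List Int) :
    aInner "y" ["x", "z"] [u, v] ks (PySem.Dict.mk [("x", a), ("y", b), ("z", c)])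
    = PySem.Dict.mk [("x", a ++ List.replicate ks.length u), ("y", b ++ ks), ("z", c ++ List.replicate ks.length v)] := by
  induction ks generalizing a b c with
  | nil => simp [aInner]
  | cons k ks ih =>
    simp only [aInner, List.foldl_cons] at ih ⊢
    rw [show (let d := PySem.Dict.modify (PySem.Dict.mk [("x", a), ("y", b), ("z", c)]) "y" [] (fun l => l ++ [k])
      (PySem.List.enumerate ["x", "z"]).foldl (fun d je =>
        PySem.Dict.modify d je.2 [] (fun l => l ++ [PySem.List.pyGetD [u, v] je.1 0])) d)
      = PySem.Dict.mk [("x", a ++ [u]), ("y", b ++ [k]), ("z", c ++ [v])] from by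
        simp [PySem.Dict.modify, PySem.Dict.insert, PySem.Dict.getD, PySem.Dict.get?, PySem.List.enumerate, PySem.List.pyGetD]]
    rw [ih]
    simp [List.replicate_succ]

lemma inner_z (ks : List Int) (u v : Int) (a b c : List Int) :
    aInner "z" ["x", "y"] [u, v] ks (PySem.Dict.mk [("x", a), ("y", b), ("z", c)])
    = PySem.Dict.mk [("x", a ++ List.replicate ks.length u), ("y", b ++ List.replicate ks.length v), ("z", c ++ ks)] := by
  induction ks generalizing a b c with
  | nil => simp [aInner]
  | cons k ks ih =>
    simp only [aInner, List.foldl_cons] at ih ⊢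
    rw [show (let d := PySem.Dict.modify (PySem.Dict.mk [("x", a), ("y", b), ("z", c)]) "z" [] (fun l => l ++ [k])
      (PySem.List.enumerate ["x", "y"]).foldl (fun d je =>
        PySem.Dict.modify d je.2 [] (fun l => l ++ [PySem.List.pyGetD [u, v] je.1 0])) d)
      = PySem.Dict.mk [("x", a ++ [u]), ("y", b ++ [v]), ("z", c ++ [k])] from by
        simp [PySem.Dict.modify, PySem.Dict.insert, PySem.Dict.getD, PySem.Dict.get?, PySem.List.enumerate, PySem.List.pyGetD]]
    rw [ih]
    simp [List.replicate_succ]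

lemma outer_x (ks : List Int) (f g : Nat → Int) (n : Nat) :
    (List.range n).foldl (fun d i => aInner "x" ["y", "z"] [f i, g i] ks d)
      (PySem.Dict.mk [("x", []), ("y", []), ("z", [])])
    = PySem.Dict.mk [("x", (List.replicate n ks).flatten),
        ("y", (List.range n).flatMap fun i => List.replicate ks.length (f i)),
        ("z", (List.range n).flatMap fun i => List.replicate ks.length (g i))] := by
  induction n with
  | zero => simp
  | succ n ih =>
    rw [List.range_succ]
    simp only [List.foldl_append, List.foldl_cons, List.foldl_nil, ih, inner_x]
    simp [List.replicate_succ']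

lemma outer_y (ks : List Int) (f g : Nat → Int) (n : Nat) :
    (List.range n).foldl (fun d i => aInner "y" ["x", "z"] [f i, g i] ks d)
      (PySem.Dict.mk [("x", []), ("y", []), ("z", [])])
    = PySem.Dict.mk [("x", (List.range n).flatMap fun i => List.replicate ks.length (f i)),
        ("y", (List.replicate n ks).flatten),
        ("z", (List.range n).flatMap fun i => List.replicate ks.length (g i))] := by
  induction n with
  | zero => simp
  | succ n ih =>
    rw [List.range_succ]
    simp only [List.foldl_append, List.foldl_cons, List.foldl_nil, ih, inner_y]
    simp [List.replicate_succ']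

lemma outer_z (ks : List Int) (f g : Nat → Int) (n : Nat) :
    (List.range n).foldl (fun d i => aInner "z" ["x", "y"] [f i, g i] ks d)
      (PySem.Dict.mk [("x", []), ("y", []), ("z", [])])
    = PySem.Dict.mk [("x", (List.range n).flatMap fun i => List.replicate ks.length (f i)),
        ("y", (List.range n).flatMap fun i => List.replicate ks.length (g i)),
        ("z", (List.replicate n ks).flatten)] := by
  induction n with
  | zero => simp
  | succ n ih =>
    rw [List.range_succ]
    simp only [List.foldl_append, List.foldl_cons, List.foldl_nil, ih, inner_z]
    simp [List.replicate_succ']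

-- ===== VERDICT (by name: the statement is the Claim_ definition above) =====
theorem extruder_spec : Claim_equal_extruder := by
  intro xy_img minx maxy fix _ hpre
  obtain ⟨hfix, -, -⟩ := hpre
  unfold Spec_extruder extruder extruder_alt
  dsimp only
  rcases hfix with h | h | h <;> subst h
  · rw [show (PySem.List.remove? ["x", "y", "z"] "x").getD [] = ["y", "z"] from rfl]
    rw [outer_x]
    rfl
  · rw [show (PySem.List.remove? ["x", "y", "z"] "y").getD [] = ["x", "z"] from rfl]
    rw [outer_y]
    rfl
  · rw [show (PySem.List.remove? ["x", "y", "z"] "z").getD [] = ["x", "y"] from rfl]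
    rw [outer_z]
    rfl
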